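-- pv_equiv track=rewrite | github.com/resitasw/CP | Shopee2507/tes.py | cari_turun
-- ===== SOURCE A (Python) =====
-- def cari_turun(arr):
--     aw = 0
--     ak = 0
--     peak = -1
--     index = -1
--
--     for j in range(len(arr) - 1):
--         if arr[j] - 1 != arr[j + 1]:
--             # peak = arr[aw]
--
--             if arr[j] != 1:
--
--                 ak = j
--                 aw = j + 1
--                 continue
--             else:
--                 if arr[aw] > peak:
--                     peak = arr[aw]
--                     index = aw
--             ak = j
--             aw = j + 1
--     nyoh = len(arr)
--     if aw >= ak and arr[-1] == 1 and arr[nyoh - 2] - 1 == arr[nyoh - 1]: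
--         return (arr[aw], aw)
--     return (peak, index)
-- ===== SOURCE B (Python) =====
-- def cari_turun(arr):
--     # Pass 1: split arr into maximal runs that descend by exactly 1,
--     # recording (start_index, start_value, end_value) for each finished run.
--     runs = []
--     s = 0
--     for i in range(1, len(arr)):
--         if arr[i - 1] - 1 != arr[i]:
--             runs.append((s, arr[s], arr[i - 1]))
--             s = i
--     # Trailing run: if it has length >= 2 and ends at 1, it wins outright.
--     if arr[-1] == 1 and s < len(arr) - 1:
--         return (arr[s], s)
--     # Pass 2: best finished run ending at 1 (first maximum wins).
--     peak, index = -1, -1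
--     for s0, v0, e0 in runs:
--         if e0 == 1 and v0 > peak:
--             peak, index = v0, s0
--     return (peak, index)
-- ===== Notes on version B (the rewrite author's own statement) =====
-- stated objective: alternative
-- what changed: B first decomposes the array into the list of maximal descend-by-1 runs (start index, start value, end value) in one pass, then handles the trailing-run shortcut and takes the maximum over finished runs ending at 1 in a separate pass, instead of A's single loop that mutates aw/ak/peak/index in place with a continue and a tail condition reading the last two elements.
-- outside the precondition, e.g. on cari_turun([]): A raises IndexError, B raises IndexError
import Mathlib
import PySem

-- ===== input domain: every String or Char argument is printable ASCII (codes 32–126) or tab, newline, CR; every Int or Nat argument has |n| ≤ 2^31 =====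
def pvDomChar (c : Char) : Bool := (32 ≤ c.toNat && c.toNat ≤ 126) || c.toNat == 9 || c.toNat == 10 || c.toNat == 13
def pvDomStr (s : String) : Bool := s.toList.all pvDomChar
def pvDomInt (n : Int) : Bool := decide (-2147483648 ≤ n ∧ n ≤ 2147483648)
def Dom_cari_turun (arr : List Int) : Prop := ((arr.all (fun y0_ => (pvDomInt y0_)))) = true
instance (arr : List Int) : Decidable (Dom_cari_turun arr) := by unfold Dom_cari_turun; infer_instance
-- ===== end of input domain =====

-- B splits the array into maximal descend-by-1 runs in one pass and picks the winner in a second pass,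
-- instead of A's single in-place-state loop; same O(n) cost (objective: alternative).


-- ===== PORT A =====
-- loop body of A's single for-loop; state = (aw, ak, peak, index)
def stepA (arr : List Int) (s : Int × Int × Int × Int) (j : Int) : Int × Int × Int × Int :=
  if PySem.List.pyGetD arr j 0 - 1 ≠ PySem.List.pyGetD arr (j + 1) 0 then
    if PySem.List.pyGetD arr j 0 ≠ 1 then
      (j + 1, j, s.2.2.1, s.2.2.2)
    else
      if PySem.List.pyGetD arr s.1 0 > s.2.2.1 then
        (j + 1, j, PySem.List.pyGetD arr s.1 0, s.1)
      else
        (j + 1, j, s.2.2.1, s.2.2.2)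
  else s

def cari_turun (arr : List Int) : Int × Int :=
  let st := (PySem.List.pyRange 0 ((arr.length : Int) - 1) 1).foldl (stepA arr) (0, 0, -1, -1)
  let nyoh : Int := arr.length
  if st.1 ≥ st.2.1 ∧ PySem.List.pyGetD arr (-1) 0 = 1 ∧
      PySem.List.pyGetD arr (nyoh - 2) 0 - 1 = PySem.List.pyGetD arr (nyoh - 1) 0 then
    (PySem.List.pyGetD arr st.1 0, st.1)
  else
    (st.2.2.1, st.2.2.2)

-- ===== PORT B =====
-- pass 1 body: state = (runs, s); a finished run is (start_index, start_value, end_value)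
def stepB (arr : List Int) (s : List (Int × Int × Int) × Int) (i : Int) : List (Int × Int × Int) × Int :=
  if PySem.List.pyGetD arr (i - 1) 0 - 1 ≠ PySem.List.pyGetD arr i 0 then
    (s.1 ++ [(s.2, PySem.List.pyGetD arr s.2 0, PySem.List.pyGetD arr (i - 1) 0)], i)
  else s

-- pass 2 body: best finished run ending at 1 (first maximum wins)
def redStep (p : Int × Int) (r : Int × Int × Int) : Int × Int :=
  if r.2.2 = 1 ∧ r.2.1 > p.1 then (r.2.1, r.1) else p

def cari_turun_alt (arr : List Int) : Int × Int :=
  let n : Int := arr.length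
  let st := (PySem.List.pyRange 1 n 1).foldl (stepB arr) ([], 0)
  if PySem.List.pyGetD arr (-1) 0 = 1 ∧ st.2 < n - 1 then
    (PySem.List.pyGetD arr st.2 0, st.2)
  else
    st.1.foldl redStep (-1, -1)

-- ===== PRECONDITION & SPEC =====
-- A unconditionally indexes the last element, so it raises IndexError on the empty list (B raises there too).
def Pre_cari_turun (arr : List Int) : Prop := arr ≠ []
instance (arr : List Int) : Decidable (Pre_cari_turun arr) := by unfold Pre_cari_turun; infer_instance
def pvWitness_cari_turun : List Int := [3, 2, 1]

def Spec_cari_turun (arr : List Int) (out : Int × Int) : Prop := out = cari_turun_alt arr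
instance (arr : List Int) (out : Int × Int) : Decidable (Spec_cari_turun arr out) := by unfold Spec_cari_turun; infer_instance

-- ===== CLAIM (what is proved, stated in full; the proofs are below) =====
def Claim_equal_cari_turun : Prop := ∀ (arr : List Int), Dom_cari_turun arr → Pre_cari_turun arr → Spec_cari_turun arr (cari_turun arr)

-- ===== LEMMAS AND PROOFS =====

-- Joint loop invariant after processing the first m comparison positions.
theorem inv_loops (arr : List Int) (m : Nat) :
    (((PySem.List.pyRange 0 (m : Int) 1).foldl (stepA arr) (0, 0, -1, -1)).1
        = ((PySem.List.pyRange 1 ((m : Int) + 1) 1).foldl (stepB arr) ([], 0)).2)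
    ∧ (((PySem.List.pyRange 0 (m : Int) 1).foldl (stepA arr) (0, 0, -1, -1)).2.1
        ≤ ((PySem.List.pyRange 0 (m : Int) 1).foldl (stepA arr) (0, 0, -1, -1)).1)
    ∧ ((((PySem.List.pyRange 0 (m : Int) 1).foldl (stepA arr) (0, 0, -1, -1)).2.2.1,
        ((PySem.List.pyRange 0 (m : Int) 1).foldl (stepA arr) (0, 0, -1, -1)).2.2.2)
        = ((PySem.List.pyRange 1 ((m : Int) + 1) 1).foldl (stepB arr) ([], 0)).1.foldl redStep (-1, -1))
    ∧ (0 ≤ ((PySem.List.pyRange 1 ((m : Int) + 1) 1).foldl (stepB arr) ([], 0)).2)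
    ∧ (((PySem.List.pyRange 1 ((m : Int) + 1) 1).foldl (stepB arr) ([], 0)).2 ≤ (m : Int))
    ∧ (((PySem.List.pyRange 1 ((m : Int) + 1) 1).foldl (stepB arr) ([], 0)).2 < (m : Int) →
        PySem.List.pyGetD arr ((m : Int) - 1) 0 - 1 = PySem.List.pyGetD arr (m : Int) 0)
    ∧ (0 < ((PySem.List.pyRange 1 ((m : Int) + 1) 1).foldl (stepB arr) ([], 0)).2 →
        PySem.List.pyGetD arr (((PySem.List.pyRange 1 ((m : Int) + 1) 1).foldl (stepB arr) ([], 0)).2 - 1) 0 - 1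
          ≠ PySem.List.pyGetD arr (((PySem.List.pyRange 1 ((m : Int) + 1) 1).foldl (stepB arr) ([], 0)).2) 0) := by
  induction m with
  | zero =>
      rw [Nat.cast_zero, PySem.List.pyRange_one_eq_nil (le_refl (0:Int)),
        PySem.List.pyRange_one_eq_nil (by norm_num : (0:Int) + 1 ≤ 1)]
      refine ⟨rfl, le_refl _, rfl, le_refl _, le_refl _, ?_, ?_⟩ <;> · intro h; exact absurd h (by norm_num)
  | succ m ih =>
      have hc : ((m + 1 : Nat) : Int) = (m : Int) + 1 := by push_cast; ring
      rw [hc, PySem.List.pyRange_one_succ_right (Int.natCast_nonneg m),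
        PySem.List.pyRange_one_succ_right (by omega : (1:Int) ≤ (m : Int) + 1),
        List.foldl_append, List.foldl_append]
      obtain ⟨e1, e2, e3, e4, e5, e6, e7⟩ := ih
      simp only [List.foldl_cons, List.foldl_nil, add_sub_cancel_right]
      set sA := (PySem.List.pyRange 0 (m : Int) 1).foldl (stepA arr) (0, 0, -1, -1) with hsA
      set sB := (PySem.List.pyRange 1 ((m : Int) + 1) 1).foldl (stepB arr) ([], 0) with hsB
      unfold stepA stepB
      simp only [add_sub_cancel_right]
      by_cases hbr : PySem.List.pyGetD arr (m : Int) 0 - 1 ≠ PySem.List.pyGetD arr ((m : Int) + 1) 0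
      · rw [if_pos hbr, if_pos hbr]
        have hred : (sB.1 ++ [(sB.2, PySem.List.pyGetD arr sB.2 0, PySem.List.pyGetD arr (m : Int) 0)]).foldl redStep (-1, -1)
            = redStep (sB.1.foldl redStep (-1, -1)) (sB.2, PySem.List.pyGetD arr sB.2 0, PySem.List.pyGetD arr (m : Int) 0) := by
          simp [List.foldl_append]
        by_cases h1 : PySem.List.pyGetD arr (m : Int) 0 ≠ 1
        · rw [if_pos h1]
          dsimp only
          refine ⟨rfl, by omega, ?_, by omega, by omega, by intro h; omega, fun _ => by simpa using hbr⟩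
          rw [hred, redStep, if_neg (fun hh => h1 hh.1)]
          exact e3
        · simp only [ne_eq, not_not] at h1
          rw [if_neg (by simp [h1])]
          by_cases h2 : PySem.List.pyGetD arr sA.1 0 > sA.2.2.1
          · rw [if_pos h2]
            dsimp only
            refine ⟨rfl, by omega, ?_, by omega, by omega, by intro h; omega, fun _ => by simpa using hbr⟩
            rw [hred, ← e3, ← e1, redStep, if_pos (⟨h1, h2⟩ : _ ∧ _)]
          · rw [if_neg h2]
            dsimp only
            refine ⟨rfl, by omega, ?_, by omega, by omega, by intro h; omega, fun _ => by simpa using hbr⟩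
            rw [hred, ← e3, ← e1, redStep, if_neg (fun hh => h2 hh.2)]
      · rw [if_neg hbr, if_neg hbr]
        rw [not_ne_iff] at hbr
        exact ⟨e1, e2, e3, e4, by omega, fun _ => hbr, e7⟩

-- ===== VERDICT (by name: the statement is the Claim_ definition above) =====
theorem cari_turun_spec : Claim_equal_cari_turun := by
  intro arr _ hpre
  unfold Spec_cari_turun cari_turun cari_turun_alt
  have hn : 1 ≤ arr.length := List.length_pos_iff.mpr hpre
  have hc1 : ((arr.length - 1 : Nat) : Int) = (arr.length : Int) - 1 := by omega
  have hc2 : (arr.length : Int) - 1 + 1 = (arr.length : Int) := by ring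
  obtain ⟨e1, e2, e3, e4, e5, e6, e7⟩ := inv_loops arr (arr.length - 1)
  rw [hc1] at e1 e2 e3 e4 e5 e6 e7
  rw [hc2] at e1 e3 e4 e5 e6 e7
  dsimp only
  set sA := (PySem.List.pyRange 0 ((arr.length : Int) - 1) 1).foldl (stepA arr) (0, 0, -1, -1) with hsA
  set sB := (PySem.List.pyRange 1 (arr.length : Int) 1).foldl (stepB arr) ([], 0) with hsB
  by_cases hlast : PySem.List.pyGetD arr (-1) 0 = 1
  · by_cases hs : sB.2 < (arr.length : Int) - 1
    · have h3 := e6 hs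
      rw [show (arr.length : Int) - 1 - 1 = (arr.length : Int) - 2 from by ring] at h3
      rw [if_pos ⟨e2, hlast, h3⟩, if_pos ⟨hlast, hs⟩, e1]
    · by_cases hz : 0 < sB.2
      · have hne := e7 hz
        have hseq : sB.2 = (arr.length : Int) - 1 := by omega
        rw [hseq, show (arr.length : Int) - 1 - 1 = (arr.length : Int) - 2 from by ring] at hne
        rw [if_neg (fun hh => hne hh.2.2), if_neg (fun hh => hs hh.2)]
        exact e3
      · -- sB.2 = 0 and arr.length = 1: the tail test arr[n-2]-1 = arr[n-1] reads the single element twice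
        have hlen : arr.length = 1 := by omega
        obtain ⟨x, hx⟩ : ∃ x, arr = [x] := by
          cases arr with
          | nil => exact absurd rfl hpre
          | cons y t =>
              cases t with
              | nil => exact ⟨y, rfl⟩
              | cons z u => simp at hlen
        subst hx
        have hA : ¬ (sA.1 ≥ sA.2.1 ∧ PySem.List.pyGetD [x] (-1) 0 = 1 ∧
            PySem.List.pyGetD [x] (([x].length : Int) - 2) 0 - 1 = PySem.List.pyGetD [x] (([x].length : Int) - 1) 0) := by
          rintro ⟨-, -, hh⟩
          simp only [List.length_cons, List.length_nil] at hh
          norm_num at hh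
          simp [PySem.List.pyGetD, PySem.List.pyGet?, PySem.List.pyIdx?] at hh
        rw [if_neg hA, if_neg (fun hh => hs hh.2)]
        exact e3
  · rw [if_neg (fun hh => hlast hh.2.1), if_neg (fun hh => hlast hh.1)]
    exact e3
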